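-- pv_equiv track=rewrite | github.com/ensookim/algorithm | SW/stack.py | solution
-- ===== SOURCE A (Python) =====
-- def solution(arr):
--     answer = [0] * len(arr) # 0 0 0 0
--     for i in range(len(arr)-1, 0, -1):
--         for j in range(i -1, -1 ,-1):
--             if arr[i] <= arr[j]:
--                 answer[i] = j +1
--                 break
--     return answer
-- ===== SOURCE B (Python) =====
-- def solution(arr):
--     answer = []
--     stack = []  # indices; their values are nonincreasing from bottom to top
--     for i, x in enumerate(arr):
--         while stack and arr[stack[-1]] < x:
--             stack.pop()
--         answer.append(stack[-1] + 1 if stack else 0)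
--         stack.append(i)
--     return answer
-- ===== Notes on version B (the rewrite author's own statement) =====
-- stated objective: faster
-- what changed: Replaces the backwards nested scan (for each i, rescan all earlier elements) with a single left-to-right pass maintaining a monotonic stack of candidate indices.
import Mathlib
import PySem

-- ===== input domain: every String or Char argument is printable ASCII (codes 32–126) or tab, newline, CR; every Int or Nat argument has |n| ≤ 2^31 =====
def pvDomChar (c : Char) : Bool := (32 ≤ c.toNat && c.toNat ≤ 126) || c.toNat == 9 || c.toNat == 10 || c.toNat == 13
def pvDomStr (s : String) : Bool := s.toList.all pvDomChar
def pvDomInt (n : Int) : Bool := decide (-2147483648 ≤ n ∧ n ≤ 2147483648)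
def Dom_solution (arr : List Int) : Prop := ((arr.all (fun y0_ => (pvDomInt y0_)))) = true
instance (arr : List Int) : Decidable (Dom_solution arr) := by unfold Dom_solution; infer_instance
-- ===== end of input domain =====

-- B replaces A's quadratic backwards rescan with one left-to-right pass over a monotonic stack (objective: faster).

-- ===== PORT A =====
-- inner loop 'for j in range(i-1,-1,-1): if arr[i] <= arr[j]: answer[i] = j+1; break'
-- (all indices produced by range() are in bounds, so the defaulted pyGetD/pySetD are exact here)
def innerA (arr : List Int) (i : Int) (ans : List Int) : List Int → List Int
  | [] => ans
  | j :: js =>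
    if PySem.List.pyGetD arr i 0 ≤ PySem.List.pyGetD arr j 0 then
      PySem.List.pySetD ans i (j + 1)
    else innerA arr i ans js

def solution (arr : List Int) : List Int :=
  (PySem.List.pyRange ((arr.length : Int) - 1) 0 (-1)).foldl
    (fun ans i => innerA arr i ans (PySem.List.pyRange (i - 1) (-1) (-1)))
    (List.replicate arr.length 0)

-- ===== PORT B =====
-- 'while stack and arr[stack[-1]] < x: stack.pop()'  (stack held head-first: head = top)
def popWhileB (arr : List Int) (x : Int) : List Nat → List Nat
  | [] => []
  | j :: s => if PySem.List.pyGetD arr (j : Int) 0 < x then popWhileB arr x s else j :: s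

-- 'for i, x in enumerate(arr): …' — i is the running index of x
def goB (arr : List Int) (i : Nat) (st : List Nat) : List Int → List Int
  | [] => []
  | x :: rest =>
    let s := popWhileB arr x st
    (match s with | [] => 0 | j :: _ => (j : Int) + 1) :: goB arr (i + 1) (i :: s) rest

def solution_alt (arr : List Int) : List Int := goB arr 0 [] arr

-- ===== PRECONDITION & SPEC =====
def Spec_solution (arr : List Int) (out : List Int) : Prop := out = solution_alt arr
instance (arr : List Int) (out : List Int) : Decidable (Spec_solution arr out) := by unfold Spec_solution; infer_instance

-- ===== CLAIM (what is proved, stated in full; the proofs are below) =====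
def Claim_equal_solution : Prop := ∀ (arr : List Int), Dom_solution arr → Spec_solution arr (solution arr)

-- ===== LEMMAS AND PROOFS =====

/-- proof helper: arr[j] for an in-range natural index -/
def getI (arr : List Int) (j : Nat) : Int := arr.getD j 0

/-- nearest previous index (below i) whose value is ≥ v -/
def nearestGE (arr : List Int) (i : Nat) (v : Int) : Option Nat :=
  ((List.range i).reverse).find? (fun j => decide (v ≤ getI arr j))

/-- the common specification of one output cell -/
def fSpec (arr : List Int) (i : Nat) : Int :=
  match nearestGE arr i (getI arr i) with
  | some j => (j : Int) + 1
  | none => 0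

/-- stack invariant after processing the first i elements -/
def StackInv (arr : List Int) (i : Nat) (st : List Nat) : Prop :=
  ∀ v : Int, (popWhileB arr v st).head? = nearestGE arr i v

theorem popWhileB_idem (arr : List Int) {x v : Int} (hx : x ≤ v) (st : List Nat) :
    popWhileB arr v (popWhileB arr x st) = popWhileB arr v st := by
  induction st with
  | nil => rfl
  | cons j s ih =>
    simp only [popWhileB, PySem.List.pyGetD_natCast]
    by_cases h : arr.getD j 0 < x
    · rw [if_pos h, if_pos (lt_of_lt_of_le h hx), ih]
    · rw [if_neg h]
      simp [popWhileB]

theorem nearestGE_succ (arr : List Int) (i : Nat) (v : Int) :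
    nearestGE arr (i + 1) v =
      (if v ≤ getI arr i then some i else nearestGE arr i v) := by
  simp only [nearestGE, List.range_succ, List.reverse_append, List.reverse_singleton,
    List.singleton_append, List.find?]
  split_ifs with h <;> simp [h]

theorem inv_step (arr : List Int) (i : Nat) (st : List Nat)
    (h : StackInv arr i st) : StackInv arr (i + 1) (i :: popWhileB arr (getI arr i) st) := by
  intro v
  rw [nearestGE_succ]
  by_cases hv : getI arr i < v
  · have hle : ¬ v ≤ getI arr i := by omega
    simp only [popWhileB, PySem.List.pyGetD_natCast]
    have hg : (arr.getD i 0) = getI arr i := rfl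
    rw [hg, if_pos hv, popWhileB_idem arr (le_of_lt hv), h v, if_neg hle]
  · have hle : v ≤ getI arr i := by omega
    simp only [popWhileB, PySem.List.pyGetD_natCast]
    have hg : (arr.getD i 0) = getI arr i := rfl
    rw [hg, if_neg hv, if_pos hle]
    rfl

theorem goB_spec (arr : List Int) :
    ∀ (rest : List Int) (i : Nat) (st : List Nat),
      rest = arr.drop i → StackInv arr i st →
      goB arr i st rest = (List.range' i rest.length).map (fSpec arr) := by
  intro rest
  induction rest with
  | nil => intro i st _ _; simp [goB]
  | cons x rest' ih =>
    intro i st hdrop hinv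
    have hx : x = getI arr i := by
      have h0 : (arr.drop i)[0]? = arr[i]? := by
        simp [List.getElem?_drop]
      rw [← hdrop] at h0
      simp only [List.getElem?_cons_zero] at h0
      simp [getI, List.getD, ← h0]
    have hdrop' : rest' = arr.drop (i + 1) := by
      have := congrArg (List.drop 1) hdrop
      simpa [List.drop_drop, Nat.add_comm] using this
    have hhead : (popWhileB arr x st).head? = nearestGE arr i (getI arr i) := by
      rw [hx]; exact hinv _
    have hinv' : StackInv arr (i + 1) (i :: popWhileB arr x st) := by
      rw [hx]; exact inv_step arr i st hinv
    simp only [goB, List.length_cons, List.range'_succ, List.map_cons]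
    have h1 : (match popWhileB arr x st with | [] => (0 : Int) | j :: _ => (j : Int) + 1)
        = fSpec arr i := by
      cases hs : popWhileB arr x st with
      | nil => simp [fSpec, ← hhead, hs]
      | cons j s => simp [fSpec, ← hhead, hs]
    rw [h1, ih (i + 1) _ hdrop' hinv']

theorem solution_alt_eq (arr : List Int) :
    solution_alt arr = (List.range arr.length).map (fSpec arr) := by
  have hinv0 : StackInv arr 0 [] := by
    intro v; simp [popWhileB, nearestGE]
  have := goB_spec arr arr 0 [] (by simp) hinv0
  simpa [solution_alt, List.range_eq_range'] using this

-- ===== A side =====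

theorem innerA_eq (arr : List Int) (i : Int) (ans : List Int) (js : List Int) :
    innerA arr i ans js =
      match js.find? (fun j => decide (PySem.List.pyGetD arr i 0 ≤ PySem.List.pyGetD arr j 0)) with
      | some j => PySem.List.pySetD ans i (j + 1)
      | none => ans := by
  induction js with
  | nil => rfl
  | cons j js ih =>
    simp only [innerA, List.find?]
    split_ifs with h <;> simp [h, ih]

theorem pyRange_countdown (i : Int) (hi : 0 ≤ i) :
    PySem.List.pyRange (i - 1) (-1) (-1) =
      ((List.range i.toNat).reverse).map (fun j : Nat => (j : Int)) := by
  rw [PySem.List.pyRange_neg_one]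
  have hlen : (i - 1 - (-1)).toNat = i.toNat := by omega
  rw [hlen]
  apply List.ext_getElem
  · simp
  · intro k h1 h2
    simp only [List.length_map, List.length_range] at h1
    simp only [List.getElem_map, List.getElem_reverse, List.length_range, List.getElem_range]
    omega

theorem innerA_nearest (arr : List Int) (i : Nat) (hi : i < arr.length) (ans : List Int) :
    innerA arr (i : Int) ans (PySem.List.pyRange ((i : Int) - 1) (-1) (-1)) =
      match nearestGE arr i (getI arr i) with
      | some j => ans.set i ((j : Int) + 1)
      | none => ans := by
  rw [innerA_eq, pyRange_countdown (i : Int) (by omega), List.find?_map]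
  have hfind : ((List.range (Int.toNat i)).reverse).find?
      ((fun j => decide (PySem.List.pyGetD arr (i : Int) 0 ≤ PySem.List.pyGetD arr j 0)) ∘ (fun j : Nat => (j : Int)))
      = nearestGE arr i (getI arr i) := by
    have hfun : ((fun j => decide (PySem.List.pyGetD arr (i : Int) 0 ≤ PySem.List.pyGetD arr j 0)) ∘ (fun j : Nat => (j : Int)))
        = (fun j : Nat => decide (getI arr i ≤ getI arr j)) := by
      funext j
      simp [getI, PySem.List.pyGetD_natCast, List.getD]
    rw [hfun, nearestGE]
    simp
  rw [hfind]
  cases nearestGE arr i (getI arr i) with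
  | none => rfl
  | some j => simp [PySem.List.pySetD_natCast]

/-- the outer fold sets each visited index to its fSpec value (when found); other cells keep ans -/
theorem foldl_sets (arr : List Int) :
    ∀ (L : List Int), (∀ i ∈ L, 0 < i ∧ i < (arr.length : Int)) →
    ∀ (ans : List Int), ans.length = arr.length →
      (L.foldl (fun ans i => innerA arr i ans (PySem.List.pyRange (i - 1) (-1) (-1))) ans).length = arr.length ∧
      ∀ k : Nat,
        (L.foldl (fun ans i => innerA arr i ans (PySem.List.pyRange (i - 1) (-1) (-1))) ans)[k]? =
          if (k : Int) ∈ L ∧ fSpec arr k ≠ 0 then some (fSpec arr k) else ans[k]? := by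
  intro L
  induction L with
  | nil => intro _ ans hlen; simp [hlen]
  | cons i L' ih =>
    intro hmem ans hlen
    obtain ⟨hi0, hin⟩ := hmem i (by simp)
    have hik : ∃ m : Nat, (i : Int) = (m : Int) ∧ m < arr.length := ⟨i.toNat, by omega, by omega⟩
    obtain ⟨m, him, hm⟩ := hik
    have hstep : innerA arr i ans (PySem.List.pyRange (i - 1) (-1) (-1)) =
        match nearestGE arr m (getI arr m) with
        | some j => ans.set m ((j : Int) + 1)
        | none => ans := by
      rw [him]; exact innerA_nearest arr m hm ans
    have hlen' : (innerA arr i ans (PySem.List.pyRange (i - 1) (-1) (-1))).length = arr.length := by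
      rw [hstep]; cases nearestGE arr m (getI arr m) <;> simp [hlen]
    obtain ⟨hL, hK⟩ := ih (fun j hj => hmem j (by simp [hj])) _ hlen'
    refine ⟨by simpa using hL, fun k => ?_⟩
    rw [List.foldl_cons, hK k]
    have hcell : (innerA arr i ans (PySem.List.pyRange (i - 1) (-1) (-1)))[k]? =
        if (k : Int) = i ∧ fSpec arr k ≠ 0 then some (fSpec arr k) else ans[k]? := by
      rw [hstep]
      by_cases hkm : k = m
      · subst hkm
        cases hne : nearestGE arr k (getI arr k) with
        | none => simp [fSpec, hne, him]
        | some j =>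
          have : fSpec arr k = (j : Int) + 1 := by simp [fSpec, hne]
          have hj1 : ((j : Int) + 1) ≠ 0 := by omega
          simp [this, him, hj1, hlen ▸ hm]
      · have hki : ¬ ((k : Int) = i) := by omega
        cases hne : nearestGE arr m (getI arr m) with
        | none => simp [hki]
        | some j =>
          rw [if_neg (by simp [hki])]
          exact List.getElem?_set_ne (by omega)
    rw [hcell]
    by_cases h1 : (k : Int) ∈ L' ∧ fSpec arr k ≠ 0
    · simp [h1, List.mem_cons]
    · by_cases h2 : (k : Int) = i ∧ fSpec arr k ≠ 0
      · simp only [if_neg h1, if_pos h2]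
        rw [if_pos ⟨List.mem_cons.mpr (Or.inl h2.1), h2.2⟩]
      · have : ¬ (((k : Int) = i ∨ (k : Int) ∈ L') ∧ fSpec arr k ≠ 0) := by tauto
        simp only [if_neg h1, if_neg h2, List.mem_cons]
        rw [if_neg this]

theorem fSpec_zero (arr : List Int) : fSpec arr 0 = 0 := by
  simp [fSpec, nearestGE]

theorem solution_eq (arr : List Int) :
    solution arr = (List.range arr.length).map (fSpec arr) := by
  have hmem : ∀ i ∈ PySem.List.pyRange ((arr.length : Int) - 1) 0 (-1),
      0 < i ∧ i < (arr.length : Int) := by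
    intro i hi
    rw [PySem.List.mem_pyRange_neg_one] at hi
    omega
  obtain ⟨hL, hK⟩ := foldl_sets arr _ hmem (List.replicate arr.length 0) (by simp)
  apply List.ext_getElem?
  intro k
  rw [solution, hK k]
  by_cases hk : k < arr.length
  · have hrep : (List.replicate arr.length (0 : Int))[k]? = some 0 := by
      simp [hk]
    have hmap : ((List.range arr.length).map (fSpec arr))[k]? = some (fSpec arr k) := by
      simp [hk]
    by_cases hc : (k : Int) ∈ PySem.List.pyRange ((arr.length : Int) - 1) 0 (-1) ∧ fSpec arr k ≠ 0
    · simp [hc, hmap]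
    · rw [if_neg hc, hrep, hmap]
      by_cases hz : fSpec arr k = 0
      · rw [hz]
      · exfalso
        apply hc
        refine ⟨?_, hz⟩
        rw [PySem.List.mem_pyRange_neg_one]
        have hk0 : k ≠ 0 := by
          intro h; rw [h, fSpec_zero] at hz; exact hz rfl
        omega
  · have h1 : ¬ ((k : Int) ∈ PySem.List.pyRange ((arr.length : Int) - 1) 0 (-1) ∧ fSpec arr k ≠ 0) := by
      intro ⟨h, _⟩
      rw [PySem.List.mem_pyRange_neg_one] at h
      omega
    simp [hk, Nat.le_of_not_lt hk]

-- ===== VERDICT (by name: the statement is the Claim_ definition above) =====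
theorem solution_spec : Claim_equal_solution := by
  intro arr _
  unfold Spec_solution
  rw [solution_eq, solution_alt_eq]
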